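-- pv_equiv track=rewrite | github.com/phbui/persona | persona/src/game/player/validator.py | format_mental_state_change
-- ===== SOURCE A (Python) =====
-- def format_mental_state_change(prev_mental_state: dict, curr_mental_state: dict) -> str:
--     output_lines = []
--
--     for state in curr_mental_state:
--         prev_value = prev_mental_state.get(state, 0)
--         curr_value = curr_mental_state[state]
--         delta = curr_value - prev_value
--
--         if delta >= 80:
--             descriptor = "exceptionally improved"
--         elif delta >= 60:
--             descriptor = "tremendously improved"
--         elif delta >= 40:
--             descriptor = "dramatically improved"
--         elif delta >= 20:
--             descriptor = "significantly improved"
--         elif delta >= 10: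
--             descriptor = "moderately improved"
--         elif delta > 0:
--             descriptor = "slightly improved"
--         elif delta == 0:
--             descriptor = "remained unchanged"
--         elif delta > -10:
--             descriptor = "slightly declined"
--         elif delta > -20:
--             descriptor = "moderately declined"
--         elif delta > -40:
--             descriptor = "significantly declined"
--         elif delta > -60:
--             descriptor = "dramatically declined"
--         elif delta > -80:
--             descriptor = "tremendously declined"
--         else:
--             descriptor = "exceptionally declined"
--
--         output_lines.append(f"My mental state for {state} has {descriptor} (change: {delta}).")
--
--     return " ".join(output_lines)
-- ===== SOURCE B (Python) =====
-- ADVERB_LADDER = ((80, "exceptionally"), (60, "tremendously"), (40, "dramatically"),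
--                  (20, "significantly"), (10, "moderately"))
--
--
-- def describe_delta(delta: int) -> str:
--     if delta == 0:
--         return "remained unchanged"
--     mag = abs(delta)
--     adverb = "slightly"
--     for bound, word in ADVERB_LADDER:
--         if mag >= bound:
--             adverb = word
--             break
--     direction = "improved" if delta > 0 else "declined"
--     return f"{adverb} {direction}"
--
--
-- def format_mental_state_change(prev_mental_state: dict, curr_mental_state: dict) -> str:
--     return " ".join(
--         f"My mental state for {state} has "
--         f"{describe_delta(curr - prev_mental_state.get(state, 0))} "
--         f"(change: {curr - prev_mental_state.get(state, 0)})."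
--         for state, curr in curr_mental_state.items()
--     )
-- ===== Notes on version B (the rewrite author's own statement) =====
-- stated objective: simpler
-- what changed: The two mirrored 6-branch sign cascades are replaced by one magnitude ladder (a single table scanned once on abs(delta)) plus a separate sign decision, and the explicit accumulator loop becomes a join over a generator.
import Mathlib
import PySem

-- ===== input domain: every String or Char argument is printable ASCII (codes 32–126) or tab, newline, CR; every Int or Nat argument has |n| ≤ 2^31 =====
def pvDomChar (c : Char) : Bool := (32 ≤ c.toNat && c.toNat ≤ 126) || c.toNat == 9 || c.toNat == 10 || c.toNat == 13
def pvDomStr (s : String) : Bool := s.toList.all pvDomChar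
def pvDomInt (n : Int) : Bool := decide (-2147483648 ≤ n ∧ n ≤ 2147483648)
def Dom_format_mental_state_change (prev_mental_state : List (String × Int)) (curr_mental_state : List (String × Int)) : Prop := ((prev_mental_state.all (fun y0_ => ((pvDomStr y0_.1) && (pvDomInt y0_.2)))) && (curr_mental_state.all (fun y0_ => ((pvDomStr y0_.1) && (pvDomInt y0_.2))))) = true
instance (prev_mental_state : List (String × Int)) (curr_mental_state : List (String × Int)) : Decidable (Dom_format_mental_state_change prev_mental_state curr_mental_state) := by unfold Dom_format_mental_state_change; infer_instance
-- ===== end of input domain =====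

-- B factors A's two mirrored sign cascades into one magnitude ladder plus a sign decision (objective: simpler).


-- ===== PORT A =====
def format_mental_state_change (prev_mental_state : List (String × Int)) (curr_mental_state : List (String × Int)) : String :=
  let output_lines : List String :=
    curr_mental_state.foldl (fun output_lines p =>
      let state := p.1
      let prev_value := PySem.Dict.getD (PySem.Dict.mk prev_mental_state) state 0
      let curr_value := p.2
      let delta := curr_value - prev_value
      let descriptor :=
        if delta ≥ 80 then "exceptionally improved"
        else if delta ≥ 60 then "tremendously improved"
        else if delta ≥ 40 then "dramatically improved"
        else if delta ≥ 20 then "significantly improved"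
        else if delta ≥ 10 then "moderately improved"
        else if delta > 0 then "slightly improved"
        else if delta = 0 then "remained unchanged"
        else if delta > -10 then "slightly declined"
        else if delta > -20 then "moderately declined"
        else if delta > -40 then "significantly declined"
        else if delta > -60 then "dramatically declined"
        else if delta > -80 then "tremendously declined"
        else "exceptionally declined"
      output_lines ++ ["My mental state for " ++ state ++ " has " ++ descriptor ++
                       " (change: " ++ PySem.Int.toStr delta ++ ")."]) []
  PySem.Str.join " " output_lines

-- ===== PORT B =====
def pvAdverbLadder : List (Int × String) :=
  [(80, "exceptionally"), (60, "tremendously"), (40, "dramatically"),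
   (20, "significantly"), (10, "moderately")]

-- first ladder entry whose bound is ≤ mag; default "slightly" (B's for-with-break)
def pvPickAdverb (ladder : List (Int × String)) (mag : Int) : String :=
  match ladder with
  | [] => "slightly"
  | (bound, word) :: rest => if mag ≥ bound then word else pvPickAdverb rest mag

def describe_delta (delta : Int) : String :=
  if delta = 0 then "remained unchanged"
  else
    let mag : Int := (delta.natAbs : Int)
    let adverb := pvPickAdverb pvAdverbLadder mag
    let direction := if delta > 0 then "improved" else "declined"
    adverb ++ " " ++ direction

def format_mental_state_change_alt (prev_mental_state : List (String × Int)) (curr_mental_state : List (String × Int)) : String :=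
  PySem.Str.join " " (curr_mental_state.map (fun p =>
    "My mental state for " ++ p.1 ++ " has " ++
    describe_delta (p.2 - PySem.Dict.getD (PySem.Dict.mk prev_mental_state) p.1 0) ++
    " (change: " ++ PySem.Int.toStr (p.2 - PySem.Dict.getD (PySem.Dict.mk prev_mental_state) p.1 0) ++ ")."))

-- ===== PRECONDITION & SPEC =====
def Spec_format_mental_state_change (prev_mental_state : List (String × Int)) (curr_mental_state : List (String × Int)) (out : String) : Prop := out = format_mental_state_change_alt prev_mental_state curr_mental_state
instance (prev_mental_state : List (String × Int)) (curr_mental_state : List (String × Int)) (out : String) : Decidable (Spec_format_mental_state_change prev_mental_state curr_mental_state out) := by unfold Spec_format_mental_state_change; infer_instance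

-- ===== CLAIM (what is proved, stated in full; the proofs are below) =====
def Claim_equal_format_mental_state_change : Prop := ∀ (prev_mental_state : List (String × Int)) (curr_mental_state : List (String × Int)), Dom_format_mental_state_change prev_mental_state curr_mental_state → Spec_format_mental_state_change prev_mental_state curr_mental_state (format_mental_state_change prev_mental_state curr_mental_state)

-- ===== LEMMAS AND PROOFS =====

-- A's 13-way cascade equals B's magnitude ladder + sign decision.
set_option maxHeartbeats 1000000 in
lemma descriptor_eq (delta : Int) :
    (if delta ≥ 80 then "exceptionally improved"
     else if delta ≥ 60 then "tremendously improved"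
     else if delta ≥ 40 then "dramatically improved"
     else if delta ≥ 20 then "significantly improved"
     else if delta ≥ 10 then "moderately improved"
     else if delta > 0 then "slightly improved"
     else if delta = 0 then "remained unchanged"
     else if delta > -10 then "slightly declined"
     else if delta > -20 then "moderately declined"
     else if delta > -40 then "significantly declined"
     else if delta > -60 then "dramatically declined"
     else if delta > -80 then "tremendously declined"
     else "exceptionally declined") = describe_delta delta := by
  simp only [describe_delta, pvAdverbLadder, pvPickAdverb]
  split_ifs <;> first | rfl | omega

lemma foldl_append_map {α β : Type} (f : α → β) :
    ∀ (l : List α) (acc : List β),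
      l.foldl (fun a x => a ++ [f x]) acc = acc ++ l.map f := by
  intro l
  induction l with
  | nil => intro acc; simp
  | cons x xs ih => intro acc; simp [List.foldl, ih]

-- ===== VERDICT (by name: the statement is the Claim_ definition above) =====
theorem format_mental_state_change_spec : Claim_equal_format_mental_state_change := by
  intro prev curr _
  unfold Spec_format_mental_state_change format_mental_state_change format_mental_state_change_alt
  rw [foldl_append_map]
  simp only [List.nil_append]
  congr 1
  apply List.map_congr_left
  intro p _
  rw [descriptor_eq]
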